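-- pv_equiv track=rewrite | github.com/root-devvoo/Algorithm | 프로그래머스/Lv.2/20220523_프린터_스택&큐.py | solution
-- ===== SOURCE A (Python) =====
-- from collections import deque
--
-- def solution(priorities, location):
--     rank = 0
--     priorities = deque((v, i) for i, v in enumerate(priorities)) # i or [1] = 문서인덱스, v or [0] = 중요도
--
--     while len(priorities):
--         document = priorities.popleft() # 1. 인쇄 대기목록의 가장 앞에 있는 문서(J)를 대기목록에서 꺼냅니다.
--
--         if priorities and max(priorities)[0] > document[0]: # 2. 나머지 인쇄 대기목록에서 J보다 중요도가 높은 문서가 한 개라도 존재하면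
--             priorities.append(document) # J를 대기목록의 가장 마지막에 넣습니다.
--         else: # 3. 그렇지 않으면, J를 인쇄
--             rank += 1
--             if document[1] == location:
--                 break
--
--     return rank
-- ===== SOURCE B (Python) =====
-- def solution(priorities, location):
--     # Bucket indices by priority, then process priority groups in descending
--     # order with a cyclic cursor instead of simulating the queue rotation.
--     buckets = {}
--     for i, v in enumerate(priorities):
--         buckets.setdefault(v, []).append(i)
--     rank = 0
--     cur = 0
--     for p in sorted(buckets, reverse=True):
--         idxs = buckets[p]
--         order = [i for i in idxs if i >= cur] + [i for i in idxs if i < cur]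
--         for i in order:
--             rank += 1
--             if i == location:
--                 return rank
--         cur = order[-1] + 1
--     return rank
-- ===== Notes on version B (the rewrite author's own statement) =====
-- stated objective: faster
-- what changed: Replaces A's O(n^2) deque simulation (rotate the queue element-by-element, recomputing the max each pop) with bucketing document indices by priority once and walking the priority groups in descending order with a cyclic cursor, so each document is touched O(1) times after an O(n log n) sort of the distinct priorities.
import Mathlib
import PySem

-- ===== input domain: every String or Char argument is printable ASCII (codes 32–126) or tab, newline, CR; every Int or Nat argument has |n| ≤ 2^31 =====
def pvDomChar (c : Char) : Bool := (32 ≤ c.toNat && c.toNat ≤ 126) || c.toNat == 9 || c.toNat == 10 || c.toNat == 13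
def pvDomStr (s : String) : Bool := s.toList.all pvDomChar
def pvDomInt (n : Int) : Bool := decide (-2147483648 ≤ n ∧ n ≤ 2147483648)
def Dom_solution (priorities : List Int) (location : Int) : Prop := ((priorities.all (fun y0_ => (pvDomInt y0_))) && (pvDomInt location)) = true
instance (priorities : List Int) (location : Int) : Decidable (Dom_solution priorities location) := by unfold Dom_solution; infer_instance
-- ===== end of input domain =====

-- B replaces A's O(n^2) queue-rotation simulation by bucketing indices per priority and
-- scanning the priority groups in descending order with a cyclic cursor (O(n log n)).

-- ===== PORT A =====
-- helpers for the termination measure of A's while-loop (the loop itself is a literal port)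
def pvMaxFst : List (Int × Int) → Int
  | [] => 0
  | x :: t => t.foldl (fun a y => max a y.1) x.1

def pvPfx (q : List (Int × Int)) : Nat :=
  (q.takeWhile (fun x => decide (x.1 < pvMaxFst q))).length

def pvStep : Option (Int × Int) → (Int × Int) → Option (Int × Int) := fun acc x =>
  match acc with
  | none => some x
  | some m =>
    if (decide (m.1 < x.1) || !decide (x.1 < m.1) && decide (m.2 < x.2)) = true
    then some x else some m

theorem pv_max2_aux (t : List (Int × Int)) :
    ∀ m : Int × Int, ∃ m', t.foldl pvStep (some m) = some m' ∧
      (m' = m ∨ m' ∈ t) ∧ m.1 ≤ m'.1 ∧ ∀ x ∈ t, x.1 ≤ m'.1 := by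
  induction t with
  | nil => exact fun m => ⟨m, rfl, Or.inl rfl, le_refl _, by simp⟩
  | cons x t ih =>
    intro m
    simp only [List.foldl_cons]
    by_cases hb : (decide (m.1 < x.1) || !decide (x.1 < m.1) && decide (m.2 < x.2)) = true
    · have hred : pvStep (some m) x = some x := by simp only [pvStep, if_pos hb]
      rw [hred]
      obtain ⟨m', h1, h2, h3, h4⟩ := ih x
      have hmx : m.1 ≤ x.1 := by
        simp only [Bool.or_eq_true, Bool.and_eq_true, Bool.not_eq_true', decide_eq_true_eq,
          decide_eq_false_iff_not] at hb
        rcases hb with h | ⟨h, _⟩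
        · omega
        · omega
      refine ⟨m', h1, ?_, le_trans hmx h3, ?_⟩
      · rcases h2 with rfl | h
        · exact Or.inr List.mem_cons_self
        · exact Or.inr (List.mem_cons_of_mem _ h)
      · intro y hy
        rcases List.mem_cons.1 hy with rfl | hy
        · exact h3
        · exact h4 y hy
    · have hred : pvStep (some m) x = some m := by simp only [pvStep, if_neg hb]
      rw [hred]
      obtain ⟨m', h1, h2, h3, h4⟩ := ih m
      have hxm : x.1 ≤ m.1 := by
        simp only [Bool.or_eq_true, Bool.and_eq_true, Bool.not_eq_true', decide_eq_true_eq,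
          decide_eq_false_iff_not] at hb
        push Not at hb
        omega
      refine ⟨m', h1, ?_, h3, ?_⟩
      · rcases h2 with rfl | h
        · exact Or.inl rfl
        · exact Or.inr (List.mem_cons_of_mem _ h)
      · intro y hy
        rcases List.mem_cons.1 hy with rfl | hy
        · exact le_trans hxm h3
        · exact h4 y hy

theorem pv_max2_spec (l : List (Int × Int)) (hl : l ≠ []) :
    ∃ m, PySem.List.max2? l Prod.fst Prod.snd = some m ∧ m ∈ l ∧ ∀ x ∈ l, x.1 ≤ m.1 := by
  match l with
  | [] => exact absurd rfl hl
  | x :: t =>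
    obtain ⟨m', h1, h2, h3, h4⟩ := pv_max2_aux t x
    have he : PySem.List.max2? (x :: t) Prod.fst Prod.snd = t.foldl pvStep (some x) := by
      simp only [PySem.List.max2?, List.foldl_cons]
      exact List.foldl_ext _ pvStep _ (fun acc y _ => by cases acc <;> rfl)
    refine ⟨m', he.trans h1, ?_, ?_⟩
    · rcases h2 with rfl | h
      · exact List.mem_cons_self
      · exact List.mem_cons_of_mem _ h
    · intro y hy
      rcases List.mem_cons.1 hy with rfl | hy
      · exact h3
      · exact h4 y hy

theorem pvMaxFst_spec (q : List (Int × Int)) (hq : q ≠ []) :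
    (∃ y ∈ q, y.1 = pvMaxFst q) ∧ ∀ x ∈ q, x.1 ≤ pvMaxFst q := by
  match q with
  | [] => exact absurd rfl hq
  | x :: t =>
    have he : pvMaxFst (x :: t) = (t.map (fun y => y.1)).foldl max x.1 := by
      simp [pvMaxFst, List.foldl_map]
    have hb := PySem.List.le_foldl_max (t.map (fun y => y.1)) x.1
    have hm := PySem.List.foldl_max_mem (t.map (fun y => y.1)) x.1
    constructor
    · rcases hm with h | h
      · exact ⟨x, List.mem_cons_self, by rw [he, h]⟩
      · obtain ⟨y, hy, hyx⟩ := List.mem_map.1 h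
        exact ⟨y, List.mem_cons_of_mem _ hy, by rw [he, hyx]⟩
    · intro y hy
      rcases List.mem_cons.1 hy with rfl | hy
      · rw [he]; exact hb.1
      · rw [he]; exact hb.2 _ (List.mem_map_of_mem hy)

theorem pv_takeWhile_stop {α : Type} (p : α → Bool) :
    ∀ (l : List α), (∃ y ∈ l, p y = false) → ∀ t' : List α,
      (l ++ t').takeWhile p = l.takeWhile p := by
  intro l
  induction l with
  | nil => rintro ⟨y, hy, -⟩; exact absurd hy (List.not_mem_nil)
  | cons x xs ih =>
    rintro ⟨y, hy, hpy⟩ t'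
    by_cases hx : p x = true
    · have hyx : y ∈ xs := by
        rcases List.mem_cons.1 hy with rfl | h
        · rw [hx] at hpy; cases hpy
        · exact h
      simp only [List.cons_append, List.takeWhile_cons_of_pos hx]
      rw [ih ⟨y, hyx, hpy⟩]
    · simp only [List.cons_append, List.takeWhile_cons_of_neg hx]

theorem pv_meas_rot (d : Int × Int) (rest : List (Int × Int))
    (h1 : rest ≠ []) (h2 : ((PySem.List.max2? rest Prod.fst Prod.snd).getD (0, 0)).1 > d.1) :
    (rest ++ [d]).length * (rest ++ [d]).length + pvPfx (rest ++ [d]) <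
      (d :: rest).length * (d :: rest).length + pvPfx (d :: rest) := by
  obtain ⟨m, hm1, hm2, hm3⟩ := pv_max2_spec rest h1
  rw [hm1] at h2
  obtain ⟨⟨y, hy, hyM⟩, hub⟩ := pvMaxFst_spec rest h1
  have hdM : d.1 < pvMaxFst rest := lt_of_lt_of_le h2 (hub m hm2)
  -- both queues have the same max of priorities
  have hcons : pvMaxFst (d :: rest) = pvMaxFst rest := by
    obtain ⟨⟨y', hy', hy'E⟩, hub'⟩ := pvMaxFst_spec (d :: rest) (List.cons_ne_nil _ _)
    have hle1 : pvMaxFst rest ≤ pvMaxFst (d :: rest) := hyM ▸ hub' y (List.mem_cons_of_mem _ hy)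
    rcases List.mem_cons.1 hy' with rfl | h
    · omega
    · have := hub y' h; omega
  have happ : pvMaxFst (rest ++ [d]) = pvMaxFst rest := by
    obtain ⟨⟨y', hy', hy'E⟩, hub'⟩ := pvMaxFst_spec (rest ++ [d]) (by simp)
    have hle1 : pvMaxFst rest ≤ pvMaxFst (rest ++ [d]) :=
      hyM ▸ hub' y (List.mem_append_left _ hy)
    rcases List.mem_append.1 hy' with h | h
    · have := hub y' h; omega
    · simp only [List.mem_singleton] at h; subst h; omega
  have hstop : (rest ++ [d]).takeWhile (fun x => decide (x.1 < pvMaxFst rest)) =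
      rest.takeWhile (fun x => decide (x.1 < pvMaxFst rest)) :=
    pv_takeWhile_stop _ rest ⟨y, hy, by simp [hyM]⟩ [d]
  have hpfx : pvPfx (rest ++ [d]) < pvPfx (d :: rest) := by
    unfold pvPfx
    rw [hcons, happ, hstop, List.takeWhile_cons_of_pos (by simp [hdM])]
    simp
  have hlen : (rest ++ [d]).length = (d :: rest).length := by simp
  rw [hlen]
  exact Nat.add_lt_add_left hpfx _

theorem pv_meas_print (d : Int × Int) (rest : List (Int × Int)) :
    rest.length * rest.length + pvPfx rest <
      (d :: rest).length * (d :: rest).length + pvPfx (d :: rest) := by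
  have h1 : pvPfx rest ≤ rest.length := (List.takeWhile_sublist _).length_le
  simp only [List.length_cons]
  have hL : (rest.length + 1) * (rest.length + 1)
      = rest.length * rest.length + 2 * rest.length + 1 := by ring
  rw [hL]
  generalize rest.length * rest.length = A
  omega

-- the while-loop of A: pop the front; if a strictly more important document remains,
-- requeue it at the back, else print it (and stop if it is the looked-up one)
def solutionLoop (location : Int) (q : List (Int × Int)) (rank : Int) : Int :=
  match q with
  | [] => rank
  | d :: rest =>
    -- 'priorities and max(priorities)[0] > document[0]' (the .getD default is never
    -- read: the left conjunct guards rest ≠ [])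
    if rest ≠ [] ∧ ((PySem.List.max2? rest Prod.fst Prod.snd).getD (0, 0)).1 > d.1 then
      solutionLoop location (rest ++ [d]) rank
    else if d.2 == location then rank + 1
    else solutionLoop location rest (rank + 1)
termination_by q.length * q.length + pvPfx q
decreasing_by
  · rename_i h
    exact pv_meas_rot d rest h.1 h.2
  · exact pv_meas_print d rest

def solution (priorities : List Int) (location : Int) : Int :=
  solutionLoop location ((PySem.List.enumerate priorities).map (fun p => (p.2, p.1))) 0

-- ===== PORT B =====
-- 'for i in order: rank += 1; if i == location: return rank' — inl = early return, inr = fall through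
def bInner (location : Int) : List Int → Int → Int ⊕ Int
  | [], rank => .inr rank
  | i :: rest, rank => if i == location then .inl (rank + 1) else bInner location rest (rank + 1)

-- 'for p in sorted(buckets, reverse=True): …'
def bOuter (location : Int) (buckets : PySem.Dict Int (List Int)) :
    List Int → Int → Int → Int
  | [], _, rank => rank
  | p :: ps, cur, rank =>
    let idxs := buckets.getD p []
    let order := idxs.filter (fun i => decide (cur ≤ i)) ++ idxs.filter (fun i => decide (i < cur))
    match bInner location order rank with
    | .inl res => res
    | .inr rank' => bOuter location buckets ps (PySem.List.pyGetD order (-1) 0 + 1) rank'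

def solution_alt (priorities : List Int) (location : Int) : Int :=
  let pairs := (PySem.List.enumerate priorities).map (fun p => (p.2, p.1))
  let buckets := pairs.foldl (fun d p => d.modify p.1 [] (fun l => l ++ [p.2])) PySem.Dict.empty
  let ps := PySem.List.sorted buckets.keys (fun x => x) true
  bOuter location buckets ps 0 0

-- ===== PRECONDITION & SPEC =====
def Spec_solution (priorities : List Int) (location : Int) (out : Int) : Prop := out = solution_alt priorities location
instance (priorities : List Int) (location : Int) (out : Int) : Decidable (Spec_solution priorities location out) := by unfold Spec_solution; infer_instance

-- ===== CLAIM (what is proved, stated in full; the proofs are below) =====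
def Claim_equal_solution : Prop := ∀ (priorities : List Int) (location : Int), Dom_solution priorities location → Spec_solution priorities location (solution priorities location)

-- ===== LEMMAS AND PROOFS =====

-- the cyclic arrangement of l, by key f, starting at cursor cur
def pvCyc {α : Type} (f : α → Int) (l : List α) (cur : Int) : List α :=
  l.filter (fun x => decide (cur ≤ f x)) ++ l.filter (fun x => decide (f x < cur))

def pvBucket (rem : List (Int × Int)) (p : Int) : List Int :=
  (rem.filter (fun x => x.1 == p)).map (fun x => x.2)

theorem pvCyc_perm {α : Type} (f : α → Int) (l : List α) (cur : Int) :
    (pvCyc f l cur).Perm l := by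
  unfold pvCyc
  have h : l.filter (fun x => decide (f x < cur)) =
      l.filter (fun x => !(decide (cur ≤ f x))) :=
    List.filter_congr (fun x _ => by by_cases h : cur ≤ f x <;> first | (simp [h]; omega) | simp [h])
  rw [h]
  exact List.filter_append_perm _ l

theorem mem_pvCyc {α : Type} {f : α → Int} {l : List α} {cur : Int} {x : α}
    (h : x ∈ pvCyc f l cur) : x ∈ l := ((pvCyc_perm f l cur).mem_iff).1 h

theorem pvCyc_eq_nil {α : Type} {f : α → Int} {l : List α} {cur : Int}
    (h : pvCyc f l cur = []) : l = [] := by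
  have hp := pvCyc_perm f l cur
  rw [h] at hp
  exact hp.symm.eq_nil

-- with an ascending key, the below-b part splits at any a ≤ b
theorem pvFilter_split {α : Type} (f : α → Int) :
    ∀ (l : List α), l.Pairwise (fun x y => f x < f y) → ∀ a b : Int, a ≤ b →
      l.filter (fun x => decide (f x < b)) =
        l.filter (fun x => decide (f x < a)) ++
          l.filter (fun x => decide (a ≤ f x) && decide (f x < b)) := by
  intro l
  induction l with
  | nil => intro _ a b _; simp
  | cons x xs ih =>
    intro hP a b hab
    obtain ⟨hx, hxs⟩ := List.pairwise_cons.1 hP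
    by_cases hxa : f x < a
    · have hxb : f x < b := lt_of_lt_of_le hxa hab
      simp only [List.filter_cons, decide_eq_true_eq]
      rw [if_pos hxb, if_pos hxa, if_neg (by simp; omega)]
      rw [ih hxs a b hab]
      simp
    · have h1 : xs.filter (fun y => decide (f y < a)) = [] :=
        List.filter_eq_nil_iff.2 (fun y hy => by have := hx y hy; simp; omega)
      have h2 : xs.filter (fun y => decide (a ≤ f y) && decide (f y < b)) =
          xs.filter (fun y => decide (f y < b)) :=
        List.filter_congr (fun y hy => by have := hx y hy; simp; omega)
      simp only [List.filter_cons, decide_eq_true_eq]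
      rw [if_neg hxa, h1]
      by_cases hxb : f x < b
      · rw [if_pos hxb, if_pos (by simp; omega)]
        rw [h2]
        simp
      · rw [if_neg hxb, if_neg (by simp; omega)]
        rw [h2]
        simp

-- one cyclic step: if d is at the head of the arrangement, moving the cursor past d
-- rotates it; deleting d and moving the cursor past it gives the tail
theorem pvCyc_step {α : Type} (f : α → Int) (l : List α)
    (hP : l.Pairwise (fun x y => f x < f y)) (cur : Int) (d : α) (t : List α)
    (h : pvCyc f l cur = d :: t) :
    pvCyc f l (f d + 1) = t ++ [d] ∧
      pvCyc f (l.filter (fun x => !(f x == f d))) (f d + 1) = t := by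
  unfold pvCyc at h ⊢
  rcases hF : l.filter (fun x => decide (cur ≤ f x)) with _ | ⟨e, F'⟩
  · -- no index at or past the cursor: the queue is l itself, d its head
    have hall : ∀ x ∈ l, f x < cur := fun x hx => by
      by_contra hc
      have : x ∈ l.filter (fun x => decide (cur ≤ f x)) :=
        List.mem_filter.2 ⟨hx, by simp; omega⟩
      rw [hF] at this
      exact absurd this List.not_mem_nil
    have hG : l.filter (fun x => decide (f x < cur)) = l :=
      List.filter_eq_self.2 (fun x hx => by simp [hall x hx])
    rw [hF, hG] at h
    simp only [List.nil_append] at h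
    subst h
    obtain ⟨hd, hdt⟩ := List.pairwise_cons.1 hP
    have e1 : (d :: t).filter (fun x => decide (f d + 1 ≤ f x)) = t := by
      simp only [List.filter_cons]
      rw [if_neg (by simp)]
      exact List.filter_eq_self.2 (fun y hy => by have := hd y hy; simp; omega)
    have e2 : (d :: t).filter (fun x => decide (f x < f d + 1)) = [d] := by
      simp only [List.filter_cons]
      rw [if_pos (by simp)]
      rw [List.filter_eq_nil_iff.2 (fun y hy => by have := hd y hy; simp; omega)]
    have e3 : (d :: t).filter (fun x => !(f x == f d)) = t := by
      simp only [List.filter_cons]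
      rw [if_neg (by simp)]
      exact List.filter_eq_self.2 (fun y hy => by have := hd y hy; simp; omega)
    refine ⟨by rw [e1, e2], ?_⟩
    rw [e3]
    have e4 : t.filter (fun x => decide (f d + 1 ≤ f x)) = t :=
      List.filter_eq_self.2 (fun y hy => by have := hd y hy; simp; omega)
    have e5 : t.filter (fun x => decide (f x < f d + 1)) = [] :=
      List.filter_eq_nil_iff.2 (fun y hy => by have := hd y hy; simp; omega)
    rw [e4, e5, List.append_nil]
  · -- some index at or past the cursor: d is the least such
    rw [hF] at h
    simp only [List.cons_append, List.cons.injEq] at h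
    obtain ⟨he, ht⟩ := h
    rw [he] at hF
    clear he
    have hdl : d ∈ l ∧ cur ≤ f d := by
      have hm : d ∈ l.filter (fun x => decide (cur ≤ f x)) := by rw [hF]; simp
      have h2 := List.mem_filter.1 hm
      exact ⟨h2.1, by simpa using h2.2⟩
    have hPF : (d :: F').Pairwise (fun x y => f x < f y) := hF ▸ hP.filter _
    obtain ⟨hdF', -⟩ := List.pairwise_cons.1 hPF
    have key1 : l.filter (fun x => decide (f d + 1 ≤ f x)) = F' := by
      have hcongr : l.filter (fun x => decide (f d + 1 ≤ f x)) =
          l.filter (fun x => !(f x == f d) && decide (cur ≤ f x)) := by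
        apply List.filter_congr
        intro x hx
        by_cases h1 : f d + 1 ≤ f x
        · have hcur : cur ≤ f x := by omega
          simp [h1, hcur]
          omega
        · by_cases hcur : cur ≤ f x
          · have hxF : x ∈ d :: F' := by
              rw [← hF]; exact List.mem_filter.2 ⟨hx, by simp [hcur]⟩
            rcases List.mem_cons.1 hxF with rfl | hxF'
            · simp [h1]
            · exact absurd (hdF' x hxF') (by omega)
          · simp [h1, hcur]
      rw [hcongr, ← List.filter_filter, hF]
      simp only [List.filter_cons]
      rw [if_neg (by simp)]
      exact List.filter_eq_self.2 (fun y hy => by have := hdF' y hy; simp; omega)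
    have key2 : l.filter (fun x => decide (f x < f d + 1)) =
        l.filter (fun x => decide (f x < cur)) ++ [d] := by
      rw [pvFilter_split f l hP cur (f d + 1) (by omega)]
      congr 1
      have hcomm : l.filter (fun x => decide (cur ≤ f x) && decide (f x < f d + 1)) =
          l.filter (fun x => decide (f x < f d + 1) && decide (cur ≤ f x)) :=
        List.filter_congr (fun x _ => Bool.and_comm _ _)
      rw [hcomm, ← List.filter_filter, hF]
      simp only [List.filter_cons]
      rw [if_pos (by simp)]
      rw [List.filter_eq_nil_iff.2 (fun y hy => by have := hdF' y hy; simp; omega)]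
    constructor
    · rw [key1, key2, ← List.append_assoc, ht]
    · have c2a : (l.filter (fun x => !(f x == f d))).filter
          (fun x => decide (f d + 1 ≤ f x)) = F' := by
        rw [List.filter_filter]
        have : l.filter (fun x => decide (f d + 1 ≤ f x) && !(f x == f d)) =
            l.filter (fun x => decide (f d + 1 ≤ f x)) :=
          List.filter_congr (fun x _ => by
            by_cases h1 : f d + 1 ≤ f x
            · simp [h1]; omega
            · simp [h1])
        rw [this, key1]
      have c2b : (l.filter (fun x => !(f x == f d))).filter
          (fun x => decide (f x < f d + 1)) = l.filter (fun x => decide (f x < cur)) := by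
        rw [List.filter_filter]
        have hcomm : l.filter (fun x => decide (f x < f d + 1) && !(f x == f d)) =
            l.filter (fun x => !(f x == f d) && decide (f x < f d + 1)) :=
          List.filter_congr (fun x _ => Bool.and_comm _ _)
        rw [hcomm, ← List.filter_filter, key2, List.filter_append]
        have hG : (l.filter (fun x => decide (f x < cur))).filter
            (fun x => !(f x == f d)) = l.filter (fun x => decide (f x < cur)) :=
          List.filter_eq_self.2 (fun y hy => by
            have := List.mem_filter.1 hy
            have h2 : f y < cur := by simpa using this.2
            have h3 : cur ≤ f d := hdl.2
            simp; omega)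
        rw [hG]
        simp
      rw [c2a, c2b, ht]

theorem solutionLoop_nil (location : Int) (r : Int) : solutionLoop location [] r = r := by
  rw [solutionLoop]

theorem solutionLoop_cons (location : Int) (d : Int × Int) (rest : List (Int × Int)) (r : Int) :
    solutionLoop location (d :: rest) r =
      if rest ≠ [] ∧ ((PySem.List.max2? rest Prod.fst Prod.snd).getD (0, 0)).1 > d.1 then
        solutionLoop location (rest ++ [d]) r
      else if d.2 == location then r + 1
      else solutionLoop location rest (r + 1) := by
  rw [solutionLoop]

-- rotating past the (below-max) documents before the first maximal one prints it
theorem pvRot (location p j : Int) :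
    ∀ (bef : List (Int × Int)) (rem : List (Int × Int)) (cur r : Int)
      (aft : List (Int × Int)),
      rem.Pairwise (fun x y => x.2 < y.2) →
      pvCyc (fun x => x.2) rem cur = bef ++ (p, j) :: aft →
      (∀ x ∈ bef, x.1 < p) →
      (∀ x ∈ rem, x.1 ≤ p) →
      solutionLoop location (pvCyc (fun x => x.2) rem cur) r =
        (if j == location then r + 1
         else solutionLoop location
           (pvCyc (fun x => x.2) (rem.filter (fun x => !(x.2 == j))) (j + 1)) (r + 1)) := by
  intro bef
  induction bef with
  | nil =>
    intro rem cur r aft hS hQ hbef hmax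
    have hstep := pvCyc_step (fun x => x.2) rem hS cur (p, j) aft hQ
    rw [hQ]
    simp only [List.nil_append]
    rw [solutionLoop_cons]
    have hcond : ¬(aft ≠ [] ∧
        ((PySem.List.max2? aft Prod.fst Prod.snd).getD (0, 0)).1 > (p, j).1) := by
      rintro ⟨hne, hgt⟩
      obtain ⟨m, hm1, hm2, hm3⟩ := pv_max2_spec aft hne
      rw [hm1] at hgt
      have hmem : m ∈ rem :=
        mem_pvCyc (f := fun x => x.2) (by rw [hQ]; exact List.mem_cons_of_mem _ hm2)
      have h1 := hmax m hmem
      simp only [Option.getD_some] at hgt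
      simp at hgt
      omega
    rw [if_neg hcond]
    by_cases hj : j = location
    · simp [hj]
    · rw [if_neg (by simp [hj]), if_neg (by simp [hj])]
      have h2 : pvCyc (fun x => x.2) (rem.filter (fun x => !(x.2 == j))) (j + 1) = aft := by
        simpa using hstep.2
      rw [h2]
  | cons d bef' ih =>
    intro rem cur r aft hS hQ hbef hmax
    have hQ' : pvCyc (fun x => x.2) rem cur = d :: (bef' ++ (p, j) :: aft) := by
      simpa using hQ
    have hstep := pvCyc_step (fun x => x.2) rem hS cur d (bef' ++ (p, j) :: aft) hQ'
    have hd : d.1 < p := hbef d List.mem_cons_self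
    rw [hQ', solutionLoop_cons]
    have hcond : (bef' ++ (p, j) :: aft) ≠ [] ∧
        ((PySem.List.max2? (bef' ++ (p, j) :: aft) Prod.fst Prod.snd).getD (0, 0)).1 > d.1 := by
      refine ⟨by simp, ?_⟩
      obtain ⟨m, hm1, hm2, hm3⟩ := pv_max2_spec (bef' ++ (p, j) :: aft) (by simp)
      rw [hm1]
      have h1 : (p, j).1 ≤ m.1 := hm3 _ (by simp)
      simp only [Option.getD_some]
      simp at h1
      omega
    rw [if_pos hcond]
    have h1 : pvCyc (fun x => x.2) rem (d.2 + 1) = (bef' ++ (p, j) :: aft) ++ [d] := by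
      simpa using hstep.1
    rw [show (bef' ++ (p, j) :: aft) ++ [d] = pvCyc (fun x => x.2) rem (d.2 + 1) from h1.symm]
    exact ih rem (d.2 + 1) r (aft ++ [d]) hS
      (by rw [h1]; simp)
      (fun x hx => hbef x (List.mem_cons_of_mem _ hx)) hmax

-- distinct queue members have distinct document indices
theorem pvIdxUnique {rem : List (Int × Int)} (hS : rem.Pairwise (fun x y => x.2 < y.2))
    {x y : Int × Int} (hx : x ∈ rem) (hy : y ∈ rem) (h : x.2 = y.2) : x = y := by
  by_contra hne
  have h2 : rem.Pairwise (fun a b => a.2 ≠ b.2) := hS.imp (by intro a b hab; omega)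
  exact (h2.forall (fun a b hab => Ne.symm hab) hx hy hne) h

theorem pvFilter_comm {α : Type} (l : List α) (p q : α → Bool) :
    (l.filter p).filter q = (l.filter q).filter p := by
  rw [List.filter_filter, List.filter_filter]
  exact List.filter_congr (fun x _ => Bool.and_comm _ _)

-- B's group order list is the p-documents of A's queue, in queue order
theorem pvOrder_eq (rem : List (Int × Int)) (p cur : Int) :
    pvCyc (fun i => i) (pvBucket rem p) cur =
      ((pvCyc (fun x => x.2) rem cur).filter (fun x => x.1 == p)).map (fun x => x.2) := by
  unfold pvCyc pvBucket
  rw [List.filter_append, List.map_append]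
  congr 1
  · rw [List.filter_map]
    rw [pvFilter_comm]
    congr 1
  · rw [List.filter_map]
    rw [pvFilter_comm]
    congr 1

theorem pvBucket_pairwise {rem : List (Int × Int)} (hS : rem.Pairwise (fun x y => x.2 < y.2))
    (p : Int) : (pvBucket rem p).Pairwise (fun a b => a < b) :=
  (hS.filter _).map _ (fun _ _ h => h)

theorem pvBucket_filter_ne (rem : List (Int × Int)) (p j : Int) :
    pvBucket (rem.filter (fun x => !(x.2 == j))) p =
      (pvBucket rem p).filter (fun i => !(i == j)) := by
  unfold pvBucket
  rw [pvFilter_comm, List.filter_map]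
  congr 1

-- the inner 'for i in order' loop of B against A's loop, one priority group
theorem pvInner (location p : Int) :
    ∀ (os : List Int) (rem : List (Int × Int)) (cur r : Int),
      rem.Pairwise (fun x y => x.2 < y.2) →
      (∀ x ∈ rem, x.1 ≤ p) →
      pvCyc (fun i => i) (pvBucket rem p) cur = os →
      os ≠ [] →
      solutionLoop location (pvCyc (fun x => x.2) rem cur) r =
        (match bInner location os r with
         | .inl res => res
         | .inr r' =>
             solutionLoop location
               (pvCyc (fun x => x.2) (rem.filter (fun x => !(x.1 == p)))
                 (PySem.List.pyGetD os (-1) 0 + 1)) r') := by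
  intro os
  induction os with
  | nil => intro rem cur r _ _ _ hne; exact absurd rfl hne
  | cons j os' ih =>
    intro rem cur r hS hmax horder hne
    have horder2 : ((pvCyc (fun x => x.2) rem cur).filter (fun x => x.1 == p)).map
        (fun x => x.2) = j :: os' := by rw [← pvOrder_eq]; exact horder
    obtain ⟨y, ys, hfil, hy2, hys⟩ := List.map_eq_cons_iff.1 horder2
    obtain ⟨bef, aft, hQdec, hbefF, hyp, haft⟩ := List.filter_eq_cons_iff.1 hfil
    have hyp' : y.1 = p := by simpa using hyp
    have hyeq : y = (p, j) := by
      obtain ⟨y1, y2⟩ := y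
      simp only [Prod.mk.injEq]
      exact ⟨hyp', hy2⟩
    rw [hyeq] at hQdec hfil
    have hyrem : (p, j) ∈ rem := mem_pvCyc (f := fun x => x.2) (by rw [hQdec]; simp)
    have hbef : ∀ x ∈ bef, x.1 < p := by
      intro x hx
      have hxr : x ∈ rem := mem_pvCyc (f := fun x => x.2)
        (by rw [hQdec]; exact List.mem_append_left _ hx)
      have h1 := hmax x hxr
      have h2 := hbefF x hx
      simp at h2
      omega
    have hrot := pvRot location p j bef rem cur r aft hS hQdec hbef hmax
    rw [hrot]
    by_cases hj : j = location
    · simp [hj, bInner]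
    · rw [if_neg (by simp [hj])]
      have hbin : bInner location (j :: os') r = bInner location os' (r + 1) := by
        simp [bInner, hj]
      rw [hbin]
      have hcfilter : (rem.filter (fun x => !(x.2 == j))).filter (fun x => !(x.1 == p)) =
          rem.filter (fun x => !(x.1 == p)) := by
        rw [pvFilter_comm]
        apply List.filter_eq_self.2
        intro x hx
        have hxm := List.mem_filter.1 hx
        have hxne : x.1 ≠ p := by simpa using hxm.2
        have : x.2 ≠ j := by
          intro hxj
          exact hxne (by rw [pvIdxUnique hS hxm.1 hyrem hxj])
        simp [this]
      cases os' with
      | nil =>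
        have hys0 : ys = [] := List.map_eq_nil_iff.1 hys
        rw [hys0] at hfil
        have hfilrem : rem.filter (fun x => x.1 == p) = [(p, j)] := by
          have h1 := ((pvCyc_perm (fun x => x.2) rem cur).filter (fun x => x.1 == p))
          rw [hfil] at h1
          exact List.perm_singleton.1 h1.symm
        have hcongr : rem.filter (fun x => !(x.2 == j)) = rem.filter (fun x => !(x.1 == p)) := by
          apply List.filter_congr
          intro x hx
          by_cases h1 : x.2 = j
          · have := pvIdxUnique hS hx hyrem h1
            simp [this]
          · by_cases h2 : x.1 = p
            · have : x ∈ rem.filter (fun x => x.1 == p) := List.mem_filter.2 ⟨hx, by simp [h2]⟩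
              rw [hfilrem] at this
              simp only [List.mem_singleton] at this
              exact absurd (by rw [this]) h1
            · simp [h1, h2]
        rw [hcongr]
        simp only [bInner]
        rw [PySem.List.pyGetD_neg_one _ _ (List.cons_ne_nil _ _)]
        simp
      | cons k os'' =>
        have hbkt : (pvBucket rem p).Pairwise (fun a b => a < b) := pvBucket_pairwise hS p
        have hstep := pvCyc_step (fun i => i) (pvBucket rem p) hbkt cur j (k :: os'') horder
        have horder' : pvCyc (fun i => i) (pvBucket (rem.filter (fun x => !(x.2 == j))) p)
            (j + 1) = k :: os'' := by
          rw [pvBucket_filter_ne]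
          simpa using hstep.2
        have hih := ih (rem.filter (fun x => !(x.2 == j))) (j + 1) (r + 1)
          (hS.filter _)
          (fun x hx => hmax x (List.mem_filter.1 hx).1)
          horder' (by simp)
        rw [hih, hcfilter]
        have hlast : PySem.List.pyGetD (j :: k :: os'') (-1) (0 : Int) =
            PySem.List.pyGetD (k :: os'') (-1) (0 : Int) := by
          rw [PySem.List.pyGetD_neg_one _ _ (List.cons_ne_nil _ _),
            PySem.List.pyGetD_neg_one _ _ (List.cons_ne_nil _ _)]
          exact List.getLast_cons _
        rw [hlast]

-- the outer 'for p in sorted(buckets, reverse=True)' loop of B against A's loop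
theorem pvOuter (location : Int) :
    ∀ (ps : List Int) (rem : List (Int × Int)) (dct : PySem.Dict Int (List Int))
      (cur r : Int),
      rem.Pairwise (fun x y => x.2 < y.2) →
      ps.Pairwise (fun a b => b < a) →
      (∀ q, q ∈ ps ↔ ∃ x, x ∈ rem ∧ x.1 = q) →
      (∀ q ∈ ps, dct.getD q [] = pvBucket rem q) →
      solutionLoop location (pvCyc (fun x => x.2) rem cur) r = bOuter location dct ps cur r := by
  intro ps
  induction ps with
  | nil =>
    intro rem dct cur r hS hP hmem hdct
    have hrem : rem = [] := by
      cases rem with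
      | nil => rfl
      | cons x t =>
        have : x.1 ∈ ([] : List Int) := (hmem x.1).2 ⟨x, List.mem_cons_self, rfl⟩
        exact absurd this List.not_mem_nil
    subst hrem
    simp [pvCyc, bOuter, solutionLoop_nil]
  | cons p ps' ih =>
    intro rem dct cur r hS hP hmem hdct
    obtain ⟨hd, hps'⟩ := List.pairwise_cons.1 hP
    obtain ⟨xp, hxp, hxp1⟩ := (hmem p).1 List.mem_cons_self
    have hmax : ∀ x ∈ rem, x.1 ≤ p := by
      intro x hx
      have h1 : x.1 ∈ p :: ps' := (hmem x.1).2 ⟨x, hx, rfl⟩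
      rcases List.mem_cons.1 h1 with h | h
      · omega
      · have := hd x.1 h; omega
    have horder : pvCyc (fun i : Int => i) (pvBucket rem p) cur =
        (pvBucket rem p).filter (fun i => decide (cur ≤ i)) ++
          (pvBucket rem p).filter (fun i => decide (i < cur)) := rfl
    have hbne : pvBucket rem p ≠ [] := by
      intro hb
      unfold pvBucket at hb
      have := List.map_eq_nil_iff.1 hb
      have := List.filter_eq_nil_iff.1 this xp hxp
      simp [hxp1] at this
    have hne : (pvBucket rem p).filter (fun i => decide (cur ≤ i)) ++
        (pvBucket rem p).filter (fun i => decide (i < cur)) ≠ [] := by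
      intro h
      exact hbne (pvCyc_eq_nil (horder.trans h))
    have hinner := pvInner location p
      ((pvBucket rem p).filter (fun i => decide (cur ≤ i)) ++
        (pvBucket rem p).filter (fun i => decide (i < cur)))
      rem cur r hS hmax horder hne
    simp only [bOuter, hdct p List.mem_cons_self]
    rw [hinner]
    cases hbi : bInner location
        ((pvBucket rem p).filter (fun i => decide (cur ≤ i)) ++
          (pvBucket rem p).filter (fun i => decide (i < cur))) r with
    | inl res => simp
    | inr r' =>
      simp only []
      apply ih
      · exact hS.filter _
      · exact hps'
      · intro q
        constructor
        · intro hq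
          obtain ⟨x, hx, hx1⟩ := (hmem q).1 (List.mem_cons_of_mem _ hq)
          refine ⟨x, List.mem_filter.2 ⟨hx, ?_⟩, hx1⟩
          have := hd q hq
          simp [hx1]
          omega
        · rintro ⟨x, hx, rfl⟩
          have hxm := List.mem_filter.1 hx
          have h1 : x.1 ∈ p :: ps' := (hmem x.1).2 ⟨x, hxm.1, rfl⟩
          have h2 : x.1 ≠ p := by simpa using hxm.2
          rcases List.mem_cons.1 h1 with h | h
          · exact absurd h h2
          · exact h
      · intro q hq
        rw [hdct q (List.mem_cons_of_mem _ hq)]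
        unfold pvBucket
        rw [pvFilter_comm]
        congr 1
        apply (List.filter_eq_self.2 _).symm
        intro x hx
        have hxm := List.mem_filter.1 hx
        have h1 : x.1 = q := by simpa using hxm.2
        have h2 := hd q hq
        simp [h1]
        omega

-- ===== VERDICT (by name: the statement is the Claim_ definition above) =====
theorem solution_spec : Claim_equal_solution := by
  intro priorities location _
  unfold Spec_solution solution solution_alt
  set rem0 : List (Int × Int) := (PySem.List.enumerate priorities).map (fun p => (p.2, p.1))
    with hrem0
  have hS0 : rem0.Pairwise (fun x y => x.2 < y.2) :=
    (PySem.List.pairwise_lt_enumerate priorities 0).map _ (fun a b h => h)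
  have hidx : ∀ x ∈ rem0, (0 : Int) ≤ x.2 := by
    intro x hx
    obtain ⟨q, hq, rfl⟩ := List.mem_map.1 hx
    obtain ⟨k, hk, rfl⟩ := (PySem.List.mem_enumerate_iff _ _ _).1 hq
    simp
  have hQ0 : pvCyc (fun x => x.2) rem0 0 = rem0 := by
    unfold pvCyc
    rw [List.filter_eq_self.2 (fun x hx => by simpa using hidx x hx),
      List.filter_eq_nil_iff.2 (fun x hx => by have := hidx x hx; simp; omega),
      List.append_nil]
  set dct := rem0.foldl (fun d p => d.modify p.1 [] (fun l => l ++ [p.2]))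
    (PySem.Dict.empty : PySem.Dict Int (List Int)) with hdct0
  have hdctD : ∀ q : Int, dct.getD q [] = pvBucket rem0 q := by
    intro q
    rw [hdct0, PySem.Dict.getD_foldl_modify_append]
    rfl
  have hkeys : dct.keys = PySem.Set.ofList (rem0.map (fun x => x.1)) := by
    rw [hdct0, PySem.Dict.keys_foldl_modify_key rem0 (fun x => x.1) []
      (fun _ x => (fun l => l ++ [x.2]))]
    rfl
  have hkeysN : dct.keys.Nodup := by
    rw [hkeys]; exact PySem.Set.nodup_ofList _
  set ps0 := PySem.List.sorted dct.keys (fun x => x) true with hps0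
  have hpsP : ps0.Pairwise (fun a b => b < a) := by
    have h1 := PySem.List.sorted_pairwise_rev dct.keys (fun x => x)
    have h2 : ps0.Nodup := (PySem.List.sorted_perm dct.keys (fun x => x) true).nodup_iff.2 hkeysN
    exact (h1.and h2).imp (by rintro a b ⟨hle, hne⟩; omega)
  have hpsM : ∀ q, q ∈ ps0 ↔ ∃ x, x ∈ rem0 ∧ x.1 = q := by
    intro q
    rw [hps0, PySem.List.mem_sorted, hkeys, PySem.Set.mem_ofList]
    constructor
    · intro h
      obtain ⟨x, hx, rfl⟩ := List.mem_map.1 h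
      exact ⟨x, hx, rfl⟩
    · rintro ⟨x, hx, rfl⟩
      exact List.mem_map.2 ⟨x, hx, rfl⟩
  have := pvOuter location ps0 rem0 dct 0 0 hS0 hpsP hpsM (fun q _ => hdctD q)
  rw [hQ0] at this
  exact this
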